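-- pv_equiv track=rewrite | github.com/Brendan-S-1058/SpyglassWebApp | src/writePublic.py | Local
-- ===== SOURCE A (Python) =====
-- def Local (datain):
--     start = True
--     endStart = False
--     dataout = ''
--     for char in  datain:
--         if char == ',' and start == True:
--             start = False
--         elif start == True and char != ',':
--             start = False
--             dataout += char
--             endStart = True
--         elif start == False and char != ',':
--             dataout += char
--             endStart = True
--         elif char == ',' and endStart == True:
--             dataout += char
--         if char == '/':
--             start = True
--             endStart = False
--
--     #should remove leading mode value and all leading commas
--
--     return dataout
-- ===== SOURCE B (Python) =====
-- def Local(datain):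
--     return '/'.join(seg.lstrip(',') for seg in datain.split('/'))
-- ===== Notes on version B (the rewrite author's own statement) =====
-- stated objective: idiomatic
-- what changed: Replaced the per-character two-flag state-machine loop with a split('/') / lstrip(',') / '/'.join pipeline that strips leading commas from each segment.
import Mathlib
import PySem

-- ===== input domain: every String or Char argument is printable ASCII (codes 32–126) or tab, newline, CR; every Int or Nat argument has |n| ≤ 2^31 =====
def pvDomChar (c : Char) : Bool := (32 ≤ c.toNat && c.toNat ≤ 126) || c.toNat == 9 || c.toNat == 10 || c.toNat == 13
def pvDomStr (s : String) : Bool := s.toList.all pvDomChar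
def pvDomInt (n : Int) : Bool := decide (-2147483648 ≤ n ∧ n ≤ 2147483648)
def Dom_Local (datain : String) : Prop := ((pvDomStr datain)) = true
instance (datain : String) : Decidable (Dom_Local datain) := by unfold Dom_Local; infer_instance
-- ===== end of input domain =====

-- B replaces A's per-character two-flag state machine by a split('/') / lstrip(',') / join pipeline (idiomatic; same cost).


-- ===== PORT A =====
-- one loop iteration of A: the four elif branches in order, then the '/' reset
def pvStepA (st : Bool × Bool × List Char) (char : Char) : Bool × Bool × List Char :=
  let start := st.1
  let endStart := st.2.1
  let dataout := st.2.2
  let st' : Bool × Bool × List Char :=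
    if char = ',' ∧ start = true then (false, endStart, dataout)
    else if start = true ∧ char ≠ ',' then (false, true, dataout ++ [char])
    else if start = false ∧ char ≠ ',' then (start, true, dataout ++ [char])
    else if char = ',' ∧ endStart = true then (start, endStart, dataout ++ [char])
    else (start, endStart, dataout)
  if char = '/' then (true, false, st'.2.2) else st'

def Local (datain : String) : String :=
  String.ofList (datain.toList.foldl pvStepA (true, false, [])).2.2

-- ===== PORT B =====
-- split('/') → List.splitOn '/', seg.lstrip(',') → dropWhile (· == ',') (exact: lstrip with the
-- one-char set ',' removes exactly the leading commas), '/'.join → List.intercalate ['/']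
def Local_alt (datain : String) : String :=
  String.ofList (List.intercalate ['/']
    ((datain.toList.splitOn '/').map (fun seg => seg.dropWhile (· == ','))))

-- ===== PRECONDITION & SPEC =====
def Spec_Local (datain : String) (out : String) : Prop := out = Local_alt datain
instance (datain : String) (out : String) : Decidable (Spec_Local datain out) := by unfold Spec_Local; infer_instance

-- ===== CLAIM (what is proved, stated in full; the proofs are below) =====
def Claim_equal_Local : Prop := ∀ (datain : String), Dom_Local datain → Spec_Local datain (Local datain)

-- ===== LEMMAS AND PROOFS =====

-- common specification: pvStrip b cs strips leading commas of the current segment iff b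
def pvStrip (b : Bool) : List Char → List Char
  | [] => []
  | c :: cs =>
    if c = '/' then '/' :: pvStrip true cs
    else if b ∧ c = ',' then pvStrip true cs
    else c :: pvStrip false cs

theorem intercalate_cons_cons (sep h : List Char) (t : List (List Char)) :
    List.intercalate sep (h :: t) = h ++ (if t = [] then [] else sep ++ List.intercalate sep t) := by
  cases t with
  | nil => simp [List.intercalate]
  | cons b l => simp [List.intercalate, List.intersperse]

theorem intercalate_head_cons (sep : List Char) (c : Char) (h : List Char) (t : List (List Char)) :
    List.intercalate sep ((c :: h) :: t) = c :: List.intercalate sep (h :: t) := by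
  rw [intercalate_cons_cons, intercalate_cons_cons]
  simp

theorem intercalate_nil_cons (h : List Char) (t : List (List Char)) :
    List.intercalate ['/'] ([] :: h :: t) = '/' :: List.intercalate ['/'] (h :: t) := by
  rw [intercalate_cons_cons]
  simp

def pvKeepHead : List (List Char) → List (List Char)
  | [] => []
  | h :: t => h :: t.map (List.dropWhile (· == ','))

-- B's pipeline computes pvStrip (true on a fresh segment, false once the head segment is kept as-is)
theorem b_strip (cs : List Char) :
    List.intercalate ['/'] ((cs.splitOn '/').map (List.dropWhile (· == ','))) = pvStrip true cs ∧
    List.intercalate ['/'] (pvKeepHead (cs.splitOn '/')) = pvStrip false cs := by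
  induction cs with
  | nil => simp [List.splitOn, List.splitOnP_nil, pvKeepHead, pvStrip, List.intercalate]
  | cons c cs ih =>
    obtain ⟨h, t, hS⟩ := List.exists_cons_of_ne_nil (List.splitOnP_ne_nil (· == '/') cs)
    rw [List.splitOn] at ih ⊢
    rw [List.splitOnP_cons, hS]
    rw [hS] at ih
    have ih1 : List.intercalate ['/'] (List.dropWhile (· == ',') h ::
        t.map (List.dropWhile (· == ','))) = pvStrip true cs := by
      have := ih.1; simpa using this
    have ih2 : List.intercalate ['/'] (h :: t.map (List.dropWhile (· == ','))) =
        pvStrip false cs := by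
      have := ih.2; simpa [pvKeepHead] using this
    by_cases hc : c = '/'
    · subst hc
      rw [if_pos (by simp)]
      constructor
      · simp only [List.map_cons, List.dropWhile_nil]
        rw [intercalate_nil_cons]
        simp [pvStrip, ih1]
      · simp only [pvKeepHead, List.map_cons]
        rw [intercalate_nil_cons]
        simp [pvStrip, ih1]
    · rw [if_neg (by simp [hc])]
      simp only [List.modifyHead_cons]
      by_cases hcm : c = ','
      · subst hcm
        constructor
        · simp only [List.map_cons, List.dropWhile_cons, beq_self_eq_true, if_pos]
          simp [pvStrip, hc, ih1]
        · simp only [pvKeepHead]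
          rw [intercalate_head_cons]
          simp [pvStrip, hc, ih2]
      · constructor
        · simp only [List.map_cons, List.dropWhile_cons]
          rw [if_neg (by simp [hcm])]
          rw [intercalate_head_cons]
          simp [pvStrip, hc, hcm, ih2]
        · simp only [pvKeepHead]
          rw [intercalate_head_cons]
          simp [pvStrip, hc, hcm, ih2]

-- A's loop invariant: with the reachable states (start → ¬endStart) the fold appends pvStrip (!endStart)
theorem a_loop (cs : List Char) :
    ∀ (start e : Bool) (acc : List Char), (start = true → e = false) →
      (cs.foldl pvStepA (start, e, acc)).2.2 = acc ++ pvStrip (!e) cs := by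
  induction cs with
  | nil => intro start e acc _; simp [pvStrip]
  | cons c cs ih =>
    intro start e acc hinv
    by_cases hc : c = '/'
    · subst hc
      cases start with
      | true =>
        have he : e = false := hinv rfl
        subst he
        rw [List.foldl_cons, show pvStepA (true, false, acc) '/' = (true, false, acc ++ ['/']) by
          simp [pvStepA]]
        rw [ih true false _ (fun _ => rfl)]
        simp [pvStrip]
      | false =>
        rw [List.foldl_cons, show pvStepA (false, e, acc) '/' = (true, false, acc ++ ['/']) by
          simp [pvStepA]]
        rw [ih true false _ (fun _ => rfl)]
        simp [pvStrip]
    · by_cases hcm : c = ','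
      · subst hcm
        cases e with
        | false =>
          cases start with
          | true =>
            rw [List.foldl_cons, show pvStepA (true, false, acc) ',' = (false, false, acc) by
              simp [pvStepA]]
            rw [ih false false _ (by simp)]
            simp [pvStrip, hc]
          | false =>
            rw [List.foldl_cons, show pvStepA (false, false, acc) ',' = (false, false, acc) by
              simp [pvStepA]]
            rw [ih false false _ (by simp)]
            simp [pvStrip, hc]
        | true =>
          have hs : start = false := by
            cases start with
            | true => exact absurd (hinv rfl) (by simp)
            | false => rfl
          subst hs
          rw [List.foldl_cons, show pvStepA (false, true, acc) ',' = (false, true, acc ++ [',']) by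
            simp [pvStepA]]
          rw [ih false true _ (by simp)]
          simp [pvStrip, hc]
      · -- ordinary character: appended, endStart becomes true
        cases start with
        | true =>
          have he : e = false := hinv rfl
          subst he
          rw [List.foldl_cons, show pvStepA (true, false, acc) c = (false, true, acc ++ [c]) by
            simp [pvStepA, hc, hcm]]
          rw [ih false true _ (by simp)]
          simp [pvStrip, hc, hcm]
        | false =>
          rw [List.foldl_cons, show pvStepA (false, e, acc) c = (false, true, acc ++ [c]) by
            simp [pvStepA, hc, hcm]]
          rw [ih false true _ (by simp)]
          simp [pvStrip, hc, hcm]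

-- ===== VERDICT (by name: the statement is the Claim_ definition above) =====
theorem Local_spec : Claim_equal_Local := by
  intro datain _
  unfold Spec_Local Local Local_alt
  rw [a_loop datain.toList true false [] (fun _ => rfl), (b_strip datain.toList).1]
  simp
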